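-- pv_equiv track=rewrite | github.com/Alys9999/ICS33 | tests/q1helper/q1solution.py | by_stock
-- ===== SOURCE A (Python) =====
-- def by_stock(db : {str: [(str,int,int)]}) -> {str: {str: [(int,int)]}}:
--     stock_names=set()
--     full_dict={}
--     all_lists=list(db.values())
--     for x in range(len(all_lists)):
--         one_list=all_lists[x]
--         for i in one_list:
--             stock_names.add(i[0])
--     c=list(db.keys())
--     for stock in sorted(list(stock_names)):
--         full_dict[stock]=[]
--         client_share_dict={}
--         for cli in c:
--             for tup in db[cli]:
--                 if tup[0]==stock:
--                     client_share_list=[]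
--                     if cli in client_share_dict:
--                         client_share_list=client_share_dict[cli]
--                     client_share_list.append((tup[1],tup[2]))
--                     client_share_dict[cli]=client_share_list
--                     full_dict[stock]=client_share_dict
--
--     return full_dict
-- ===== SOURCE B (Python) =====
-- def by_stock(db : {str: [(str,int,int)]}) -> {str: {str: [(int,int)]}}:
--     acc = {}
--     for cli, recs in db.items():
--         for stock, shares, price in recs:
--             acc.setdefault(stock, {}).setdefault(cli, []).append((shares, price))
--     return {stock: acc[stock] for stock in sorted(acc)}
-- ===== Notes on version B (the rewrite author's own statement) =====
-- stated objective: faster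
-- what changed: B replaces A's per-stock rescan of the whole database (collect stock names, then for each sorted stock loop over all clients and all their records again) with a single pass that builds the stock->client->shares nested dict directly via setdefault, then emits the stocks in sorted order.
import Mathlib
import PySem

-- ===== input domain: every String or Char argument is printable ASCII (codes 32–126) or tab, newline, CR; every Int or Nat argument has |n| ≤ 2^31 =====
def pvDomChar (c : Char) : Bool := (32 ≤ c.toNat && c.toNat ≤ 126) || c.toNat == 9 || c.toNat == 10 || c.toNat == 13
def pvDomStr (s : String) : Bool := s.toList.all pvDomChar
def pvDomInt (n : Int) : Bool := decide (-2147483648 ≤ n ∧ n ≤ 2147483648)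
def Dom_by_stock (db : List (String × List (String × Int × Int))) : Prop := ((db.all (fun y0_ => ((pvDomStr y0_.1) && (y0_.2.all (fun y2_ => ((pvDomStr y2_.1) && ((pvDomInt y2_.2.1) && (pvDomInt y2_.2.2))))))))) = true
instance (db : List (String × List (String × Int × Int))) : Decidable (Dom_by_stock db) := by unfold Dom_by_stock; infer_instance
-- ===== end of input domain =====

-- B builds the stock→client→shares dict in ONE pass and emits stocks in sorted order,
-- instead of A's per-stock rescan of the whole database (faster).

-- ===== PORT A =====
def by_stock (db : List (String × List (String × Int × Int))) : List (String × List (String × List (Int × Int))) :=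
  let dbD : PySem.Dict String (List (String × Int × Int)) := PySem.Dict.ofList db
  -- stock_names = set(); for x in range(len(all_lists)): for i in all_lists[x]: stock_names.add(i[0])
  let allLists := dbD.values
  let stockNames : PySem.Set String :=
    (PySem.List.pyRange 0 (allLists.length : Int) 1).foldl
      (fun s x => (PySem.List.pyGetD allLists x []).foldl (fun s i => PySem.Set.add s i.1) s)
      PySem.Set.empty
  let c := dbD.keys
  -- for stock in sorted(list(stock_names)): …
  let fullDict :=
    (PySem.List.sorted stockNames (fun x => x) false).foldl
      (fun fd stock =>
        let fd := fd.insert stock ([] : List (String × List (Int × Int)))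
        let res :=
          c.foldl
            (fun (st : PySem.Dict String (List (String × List (Int × Int))) × PySem.Dict String (List (Int × Int))) cli =>
              (dbD.getD cli []).foldl
                (fun st tup =>
                  if tup.1 == stock then
                    let csl := if st.2.contains cli then st.2.getD cli [] else []
                    let csd := st.2.insert cli (csl ++ [(tup.2.1, tup.2.2)])
                    (st.1.insert stock csd.items, csd)
                  else st)
                st)
            (fd, PySem.Dict.empty)
        res.1)
      PySem.Dict.empty
  fullDict.items

-- ===== PORT B =====
def by_stock_alt (db : List (String × List (String × Int × Int))) : List (String × List (String × List (Int × Int))) :=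
  let dbD : PySem.Dict String (List (String × Int × Int)) := PySem.Dict.ofList db
  -- acc = {}; for cli, recs in db.items(): for stock, shares, price in recs: acc.setdefault(stock, {}).setdefault(cli, []).append((shares, price))
  let acc : PySem.Dict String (PySem.Dict String (List (Int × Int))) :=
    dbD.items.foldl
      (fun acc p =>
        p.2.foldl
          (fun acc t =>
            let inner := acc.getD t.1 PySem.Dict.empty
            acc.insert t.1 (inner.insert p.1 (inner.getD p.1 [] ++ [(t.2.1, t.2.2)])))
          acc)
      PySem.Dict.empty
  -- return {stock: acc[stock] for stock in sorted(acc)}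
  (PySem.List.sorted acc.keys (fun x => x) false).map
    (fun s => (s, (acc.getD s PySem.Dict.empty).items))

-- ===== PRECONDITION & SPEC =====
def Spec_by_stock (db : List (String × List (String × Int × Int))) (out : List (String × List (String × List (Int × Int)))) : Prop := out = by_stock_alt db
instance (db : List (String × List (String × Int × Int))) (out : List (String × List (String × List (Int × Int)))) : Decidable (Spec_by_stock db out) := by unfold Spec_by_stock; infer_instance

-- ===== CLAIM (what is proved, stated in full; the proofs are below) =====
def Claim_equal_by_stock : Prop := ∀ (db : List (String × List (String × Int × Int))), Dom_by_stock db → Spec_by_stock db (by_stock db)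

-- ===== LEMMAS AND PROOFS =====

def pvMatches (s : String) (recs : List (String × Int × Int)) : List (Int × Int) :=
  (recs.filter (fun t => t.1 == s)).map (fun t => (t.2.1, t.2.2))

def pvRow (s : String) (l : List (String × List (String × Int × Int))) : List (String × List (Int × Int)) :=
  (l.map (fun p => (p.1, pvMatches s p.2))).filter (fun q => !q.2.isEmpty)

theorem pvMatches_cons (s : String) (t : String × Int × Int) (recs : List (String × Int × Int)) :
    pvMatches s (t :: recs) = (if t.1 == s then [(t.2.1, t.2.2)] else []) ++ pvMatches s recs := by
  simp only [pvMatches, List.filter_cons]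
  by_cases h : t.1 == s <;> simp [h]

theorem pvRow_cons (s : String) (p : String × List (String × Int × Int)) (l : List (String × List (String × Int × Int))) :
    pvRow s (p :: l) = (if pvMatches s p.2 = [] then [] else [(p.1, pvMatches s p.2)]) ++ pvRow s l := by
  simp only [pvRow, List.map_cons, List.filter_cons]
  rcases h : pvMatches s p.2 with _ | ⟨a, t⟩ <;> simp

-- L1: B's inner record loop, entry at stock s
theorem pvB_inner (cli : String) (recs : List (String × Int × Int))
    (acc : PySem.Dict String (PySem.Dict String (List (Int × Int)))) (s : String) :
    (recs.foldl
      (fun acc t =>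
        let inner := acc.getD t.1 PySem.Dict.empty
        acc.insert t.1 (inner.insert cli (inner.getD cli [] ++ [(t.2.1, t.2.2)])))
      acc).getD s PySem.Dict.empty
    = if pvMatches s recs = [] then acc.getD s PySem.Dict.empty
      else (acc.getD s PySem.Dict.empty).insert cli
            ((acc.getD s PySem.Dict.empty).getD cli [] ++ pvMatches s recs) := by
  induction recs generalizing acc with
  | nil => simp [pvMatches]
  | cons t rest ih =>
    simp only [List.foldl_cons, pvMatches_cons]
    by_cases h : t.1 == s
    · have hs : t.1 = s := by simpa using h
      subst hs
      rw [ih]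
      by_cases hr : pvMatches t.1 rest = []
      · simp [hr, PySem.Dict.getD_insert_self]
      · simp [hr, PySem.Dict.getD_insert_self, PySem.Dict.insert_insert_self,
          PySem.Dict.getD_insert_self, List.append_assoc]
    · have hs : t.1 ≠ s := by simpa using h
      rw [ih]
      simp [h, PySem.Dict.getD_insert, Ne.symm hs]

-- L2: B's client loop, items of the entry at stock s
theorem pvB_outer (l : List (String × List (String × Int × Int)))
    (acc₀ : PySem.Dict String (PySem.Dict String (List (Int × Int))))
    (hnd : (l.map (·.1)).Nodup)
    (hfresh : ∀ p ∈ l, ∀ s, (acc₀.getD s PySem.Dict.empty).contains p.1 = false)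
    (s : String) :
    ((l.foldl
        (fun acc p =>
          p.2.foldl
            (fun acc t =>
              let inner := acc.getD t.1 PySem.Dict.empty
              acc.insert t.1 (inner.insert p.1 (inner.getD p.1 [] ++ [(t.2.1, t.2.2)])))
            acc)
        acc₀).getD s PySem.Dict.empty).items
    = (acc₀.getD s PySem.Dict.empty).items ++ pvRow s l := by
  induction l generalizing acc₀ with
  | nil => simp [pvRow]
  | cons p rest ih =>
    simp only [List.foldl_cons]
    set acc₁ := p.2.foldl
        (fun acc t =>
          let inner := acc.getD t.1 PySem.Dict.empty
          acc.insert t.1 (inner.insert p.1 (inner.getD p.1 [] ++ [(t.2.1, t.2.2)])))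
        acc₀ with hacc₁
    have hA : ∀ s', acc₁.getD s' PySem.Dict.empty
        = if pvMatches s' p.2 = [] then acc₀.getD s' PySem.Dict.empty
          else (acc₀.getD s' PySem.Dict.empty).insert p.1 (pvMatches s' p.2) := by
      intro s'
      rw [hacc₁, pvB_inner]
      by_cases hr : pvMatches s' p.2 = [] <;>
        simp [hr, PySem.Dict.getD_of_not_contains, hfresh p (by simp) s']
    have hfresh' : ∀ q ∈ rest, ∀ s', (acc₁.getD s' PySem.Dict.empty).contains q.1 = false := by
      intro q hq s'
      have hne : q.1 ≠ p.1 := by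
        intro he
        have := hnd
        simp only [List.map_cons, List.nodup_cons] at this
        exact this.1 (he ▸ List.mem_map_of_mem hq)
      rw [hA s']
      by_cases hr : pvMatches s' p.2 = [] <;>
        simp [hr, PySem.Dict.contains_insert, hne, hfresh q (List.mem_cons_of_mem _ hq) s']
    have hnd' : (rest.map (·.1)).Nodup := by
      simp only [List.map_cons, List.nodup_cons] at hnd; exact hnd.2
    rw [ih acc₁ hnd' hfresh', hA s, pvRow_cons]
    by_cases hr : pvMatches s p.2 = []
    · simp [hr]
    · simp [hr, PySem.Dict.items_insert_of_not_contains, hfresh p (by simp) s]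

theorem pvCsl (csd : PySem.Dict String (List (Int × Int))) (cli : String) :
    (if csd.contains cli then csd.getD cli [] else []) = csd.getD cli [] := by
  by_cases h : csd.contains cli <;> simp [h, PySem.Dict.getD_of_not_contains]

-- L3: A's record loop for one client
theorem pvA_inner (stock cli : String) (recs : List (String × Int × Int))
    (fd : PySem.Dict String (List (String × List (Int × Int))))
    (csd : PySem.Dict String (List (Int × Int))) :
    recs.foldl
      (fun st tup =>
        if tup.1 == stock then
          let csl := if st.2.contains cli then st.2.getD cli [] else []
          let csd := st.2.insert cli (csl ++ [(tup.2.1, tup.2.2)])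
          (st.1.insert stock csd.items, csd)
        else st)
      (fd, csd)
    = if pvMatches stock recs = [] then (fd, csd)
      else (fd.insert stock ((csd.insert cli (csd.getD cli [] ++ pvMatches stock recs)).items),
            csd.insert cli (csd.getD cli [] ++ pvMatches stock recs)) := by
  induction recs generalizing fd csd with
  | nil => simp [pvMatches]
  | cons t rest ih =>
    simp only [List.foldl_cons, pvMatches_cons]
    by_cases h : t.1 == stock
    · simp only [h, if_true]
      rw [ih]
      by_cases hr : pvMatches stock rest = []
      · simp [hr, pvCsl]
      · simp [hr, pvCsl, PySem.Dict.getD_insert_self, PySem.Dict.insert_insert_self,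
          List.append_assoc]
    · simp only [h]
      rw [ih]
      simp

-- L4: A's client loop for one stock
theorem pvA_outer (stock : String) (l : List (String × List (String × Int × Int)))
    (fd₀ : PySem.Dict String (List (String × List (Int × Int))))
    (csd₀ : PySem.Dict String (List (Int × Int)))
    (hnd : (l.map (·.1)).Nodup)
    (hfresh : ∀ p ∈ l, csd₀.contains p.1 = false) :
    (l.foldl
        (fun st p =>
          p.2.foldl
            (fun st tup =>
              if tup.1 == stock then
                let csl := if st.2.contains p.1 then st.2.getD p.1 [] else []
                let csd := st.2.insert p.1 (csl ++ [(tup.2.1, tup.2.2)])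
                (st.1.insert stock csd.items, csd)
              else st)
            st)
        (fd₀, csd₀)).2.items = csd₀.items ++ pvRow stock l
    ∧ (l.foldl
        (fun st p =>
          p.2.foldl
            (fun st tup =>
              if tup.1 == stock then
                let csl := if st.2.contains p.1 then st.2.getD p.1 [] else []
                let csd := st.2.insert p.1 (csl ++ [(tup.2.1, tup.2.2)])
                (st.1.insert stock csd.items, csd)
              else st)
            st)
        (fd₀, csd₀)).1
      = if pvRow stock l = [] then fd₀
        else fd₀.insert stock
          ((l.foldl
              (fun st p =>
                p.2.foldl
                  (fun st tup =>
                    if tup.1 == stock then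
                      let csl := if st.2.contains p.1 then st.2.getD p.1 [] else []
                      let csd := st.2.insert p.1 (csl ++ [(tup.2.1, tup.2.2)])
                      (st.1.insert stock csd.items, csd)
                    else st)
                  st)
              (fd₀, csd₀)).2.items) := by
  induction l generalizing fd₀ csd₀ with
  | nil => simp [pvRow]
  | cons p rest ih =>
    simp only [List.foldl_cons]
    rw [pvA_inner]
    have hfr : csd₀.contains p.1 = false := hfresh p (by simp)
    have hnd' : (rest.map (·.1)).Nodup := by
      simp only [List.map_cons, List.nodup_cons] at hnd; exact hnd.2
    have hne : ∀ q ∈ rest, q.1 ≠ p.1 := by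
      intro q hq he
      simp only [List.map_cons, List.nodup_cons] at hnd
      exact hnd.1 (he ▸ List.mem_map_of_mem hq)
    by_cases hm : pvMatches stock p.2 = []
    · simp only [hm, if_true]
      obtain ⟨h2, h1⟩ := ih fd₀ csd₀ hnd' (fun q hq => hfresh q (List.mem_cons_of_mem _ hq))
      refine ⟨by rw [h2, pvRow_cons, hm]; simp, ?_⟩
      rw [h1, pvRow_cons, hm]; simp
    · simp only [hm, if_false]
      set csd₁ := csd₀.insert p.1 (csd₀.getD p.1 [] ++ pvMatches stock p.2) with hcsd₁
      have hgd : csd₀.getD p.1 [] = [] := by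
        simp [PySem.Dict.getD_of_not_contains, hfr]
      have hitems : csd₁.items = csd₀.items ++ [(p.1, pvMatches stock p.2)] := by
        rw [hcsd₁, hgd]
        simp [PySem.Dict.items_insert_of_not_contains, hfr]
      have hfresh' : ∀ q ∈ rest, csd₁.contains q.1 = false := by
        intro q hq
        rw [hcsd₁]
        simp [PySem.Dict.contains_insert, hne q hq, hfresh q (List.mem_cons_of_mem _ hq)]
      obtain ⟨h2, h1⟩ := ih (fd₀.insert stock csd₁.items) csd₁ hnd' hfresh'
      have hrow : pvRow stock (p :: rest) = (p.1, pvMatches stock p.2) :: pvRow stock rest := by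
        rw [pvRow_cons]; simp [hm]
      refine ⟨by rw [h2, hitems, hrow]; simp, ?_⟩
      rw [h1, hrow]
      by_cases hr : pvRow stock rest = []
      · simp only [hr, if_true]
        rw [h2, hr]; simp
      · simp only [hr, if_false, if_neg (by simp : ¬((p.1, pvMatches stock p.2) :: pvRow stock rest = []))]
        rw [PySem.Dict.insert_insert_self]

theorem pvItemsEmpty {κ ν : Type} [BEq κ] : (PySem.Dict.empty : PySem.Dict κ ν).items = [] := rfl

-- L5: a loop over d.keys with d[cli] lookups is a loop over d.items
theorem pvKeys_to_items {σ : Type} (d : PySem.Dict String (List (String × Int × Int)))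
    (hnd : d.keys.Nodup) (g : σ → String → List (String × Int × Int) → σ) (st₀ : σ) :
    d.keys.foldl (fun st cli => g st cli (d.getD cli [])) st₀
    = d.items.foldl (fun st p => g st p.1 p.2) st₀ := by
  have hk : d.keys = d.items.map (·.1) := by simp [PySem.Dict.keys]
  rw [hk, List.foldl_map]
  refine PySem.List.foldl_congr_mem d.items _ _ st₀ ?_
  intro st p hp
  rw [PySem.Dict.getD_of_mem_items d (by simpa using hp : (p.1, p.2) ∈ d.items) hnd]

-- update distributes over a foldl of updates
theorem pvUpdate_foldl {α : Type} (xs : List α) (g : α → List String) (s0 : PySem.Set String) :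
    xs.foldl (fun s x => PySem.Set.update s (g x)) s0 = PySem.Set.update s0 (xs.flatMap g) := by
  induction xs generalizing s0 with
  | nil => simp [PySem.Set.update]
  | cons x rest ih =>
    simp only [List.foldl_cons, List.flatMap_cons]
    rw [ih]
    simp [PySem.Set.update, List.foldl_append]

-- keys of B's accumulator
theorem pvB_keys (l : List (String × List (String × Int × Int)))
    (acc₀ : PySem.Dict String (PySem.Dict String (List (Int × Int)))) :
    (l.foldl
        (fun acc p =>
          p.2.foldl
            (fun acc t =>
              let inner := acc.getD t.1 PySem.Dict.empty
              acc.insert t.1 (inner.insert p.1 (inner.getD p.1 [] ++ [(t.2.1, t.2.2)])))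
            acc)
        acc₀).keys
    = PySem.Set.update acc₀.keys (l.flatMap (fun p => p.2.map (·.1))) := by
  induction l generalizing acc₀ with
  | nil => simp [PySem.Set.update]
  | cons p rest ih =>
    simp only [List.foldl_cons, List.flatMap_cons]
    rw [ih, PySem.Dict.keys_foldl_insert_key]
    simp [PySem.Set.update, List.foldl_append]

theorem pvMain (db : List (String × List (String × Int × Int))) :
    by_stock db = by_stock_alt db := by
  unfold by_stock by_stock_alt
  dsimp only []
  set d := PySem.Dict.ofList db with hd
  set l := d.items with hl
  have hndk : d.keys.Nodup := PySem.Dict.nodup_keys_ofList db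
  have hkeys : d.keys = l.map (·.1) := by simp [PySem.Dict.keys, hl]
  have hndl : (l.map (·.1)).Nodup := hkeys ▸ hndk
  -- common stock list
  set F := l.flatMap (fun p => p.2.map (·.1)) with hF
  -- A's stock-name set is Set.ofList F
  have hA_set :
      (PySem.List.pyRange 0 ((d.values).length : Int) 1).foldl
        (fun s x => (PySem.List.pyGetD d.values x []).foldl (fun s i => PySem.Set.add s i.1) s)
        PySem.Set.empty = PySem.Set.ofList F := by
    rw [PySem.List.foldl_pyRange_pyGetD' d.values [] (fun s one => one.foldl (fun s i => PySem.Set.add s i.1) s) PySem.Set.empty (by norm_num)]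
    simp only [Int.toNat_zero, List.drop_zero]
    have h1 : ∀ (s : PySem.Set String) (one : List (String × Int × Int)),
        one.foldl (fun s i => PySem.Set.add s i.1) s = PySem.Set.update s (one.map (·.1)) := by
      intro s one
      rw [← PySem.Set.update_map_eq_foldl_add]
    simp only [h1]
    rw [pvUpdate_foldl]
    have hv : d.values = l.map (·.2) := by simp [PySem.Dict.values, hl]
    rw [hv]
    simp only [List.flatMap_map, PySem.Set.update_empty]
    rfl
  rw [hA_set]
  have hB_keys :
      (l.foldl
          (fun acc p =>
            p.2.foldl
              (fun acc t =>
                let inner := acc.getD t.1 PySem.Dict.empty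
                acc.insert t.1 (inner.insert p.1 (inner.getD p.1 [] ++ [(t.2.1, t.2.2)])))
              acc)
          PySem.Dict.empty).keys = PySem.Set.ofList F := by
    rw [pvB_keys, PySem.Dict.keys_empty, PySem.Set.update_nil_left]
  rw [hB_keys]
  set ss := PySem.List.sorted (PySem.Set.ofList F) (fun x => x) false with hss
  have hSnodup : ss.Nodup :=
    ((PySem.List.sorted_perm (PySem.Set.ofList F) (fun x => x) false).nodup_iff).mpr
      (PySem.Set.nodup_ofList F)
  -- A's per-stock step inserts exactly the row
  have hstep : ∀ (fd : PySem.Dict String (List (String × List (Int × Int)))) (stock : String),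
      (let fd' := fd.insert stock ([] : List (String × List (Int × Int)))
       let res :=
         d.keys.foldl
           (fun (st : PySem.Dict String (List (String × List (Int × Int))) × PySem.Dict String (List (Int × Int))) cli =>
             (d.getD cli []).foldl
               (fun st tup =>
                 if tup.1 == stock then
                   let csl := if st.2.contains cli then st.2.getD cli [] else []
                   let csd := st.2.insert cli (csl ++ [(tup.2.1, tup.2.2)])
                   (st.1.insert stock csd.items, csd)
                 else st)
               st)
           (fd', PySem.Dict.empty)
       res.1) = fd.insert stock (pvRow stock l) := by
    intro fd stock
    show (d.keys.foldl
           (fun st cli =>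
             (d.getD cli []).foldl
               (fun st tup =>
                 if tup.1 == stock then
                   let csl := if st.2.contains cli then st.2.getD cli [] else []
                   let csd := st.2.insert cli (csl ++ [(tup.2.1, tup.2.2)])
                   (st.1.insert stock csd.items, csd)
                 else st)
               st)
           (fd.insert stock [], PySem.Dict.empty)).1 = fd.insert stock (pvRow stock l)
    rw [pvKeys_to_items d hndk
      (fun st cli recs =>
        recs.foldl
          (fun st tup =>
            if tup.1 == stock then
              let csl := if st.2.contains cli then st.2.getD cli [] else []
              let csd := st.2.insert cli (csl ++ [(tup.2.1, tup.2.2)])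
              (st.1.insert stock csd.items, csd)
            else st)
          st)
      (fd.insert stock [], PySem.Dict.empty)]
    obtain ⟨h2, h1⟩ := pvA_outer stock l (fd.insert stock []) PySem.Dict.empty hndl
      (fun p _ => PySem.Dict.contains_empty p.1)
    rw [h1]
    by_cases hr : pvRow stock l = []
    · rw [hr]; simp
    · rw [if_neg hr, h2]
      simp [PySem.Dict.insert_insert_self, pvItemsEmpty]
  simp only [hstep]
  rw [PySem.Dict.items_foldl_insert_fresh ss (fun s => s) (fun s => pvRow s l) PySem.Dict.empty
    (fun a _ => PySem.Dict.contains_empty a) (by simpa using hSnodup)]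
  have hBe : ∀ s ∈ ss,
      ((l.foldl
          (fun acc p =>
            p.2.foldl
              (fun acc t =>
                let inner := acc.getD t.1 PySem.Dict.empty
                acc.insert t.1 (inner.insert p.1 (inner.getD p.1 [] ++ [(t.2.1, t.2.2)])))
              acc)
          PySem.Dict.empty).getD s PySem.Dict.empty).items = pvRow s l := by
    intro s _
    rw [pvB_outer l PySem.Dict.empty hndl
      (fun p _ s' => by simp [PySem.Dict.getD_empty, PySem.Dict.contains_empty])]
    simp [PySem.Dict.getD_empty, pvItemsEmpty]
  calc PySem.Dict.empty.items ++ ss.map (fun s => (s, pvRow s l))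
      = ss.map (fun s => (s, pvRow s l)) := by rw [pvItemsEmpty, List.nil_append]
    _ = _ := by
        refine List.map_congr_left ?_ |>.symm
        intro s hs
        rw [hBe s hs]

-- ===== VERDICT (by name: the statement is the Claim_ definition above) =====
theorem by_stock_spec : Claim_equal_by_stock := by
  intro db _
  show by_stock db = by_stock_alt db
  exact pvMain db
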